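-- pv_equiv track=rewrite | github.com/Atlasfailed/bar-duel-championship | actions/update_leaderboard.py | get_tier_with_match_requirements
-- ===== SOURCE A (Python) =====
-- TIER_DEFINITIONS = [
--     ("Bronze",      1,   20,  900, 1200),  # Bottom 20%: 900-1200 CR (300 CR range)
--     ("Silver",     20,   40, 1200, 1500),  # 20-40%: 1200-1500 CR (300 CR range)
--     ("Gold",       40,   60, 1500, 1800),  # 40-60%: 1500-1800 CR (300 CR range)
--     ("Platinum",   60,   80, 1800, 2100),  # 60-80%: 1800-2100 CR (300 CR range)
--     ("Diamond",    80,   95, 2100, 2500),  # 80-95%: 2100-2500 CR (400 CR range)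
--     ("Master",     95,   99, 2500, 3000),  # 95-99%: 2500-3000 CR (500 CR range)
--     ("Grandmaster", 99, 100, 3000, 5000),  # Top 1%: 3000+ CR (unlimited)
-- ]
--
-- def get_tier_from_cr(champion_rating: int) -> str:
--     """Get tier name from Champion Rating."""
--     for tier_name, _, _, min_cr, max_cr in TIER_DEFINITIONS:
--         if min_cr <= champion_rating < max_cr:
--             return tier_name
--
--     # If CR is below lowest tier, return lowest tier
--     if champion_rating < TIER_DEFINITIONS[0][3]:  # Below Bronze minimum
--         return TIER_DEFINITIONS[0][0]  # Return Bronze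
--
--     # If CR is above highest tier, return highest tier
--     return TIER_DEFINITIONS[-1][0]
--
-- def get_tier_with_match_requirements(champion_rating: int, matches_played: int) -> str:
--     """Get tier name considering both CR and minimum match requirements."""
--     # Get the tier based purely on Champion Rating
--     cr_tier = get_tier_from_cr(champion_rating)
--
--     # Define minimum match requirements for each tier
--     TIER_MATCH_REQUIREMENTS = {
--         "Bronze": 0,      # No minimum - starting tier
--         "Silver": 5,      # Must play 5+ matches to advance from Bronze
--         "Gold": 10,       # Must play 10+ matches to reach Gold
--         "Platinum": 15,   # Must play 15+ matches to reach Platinum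
--         "Diamond": 20,    # Must play 20+ matches to reach Diamond
--         "Master": 25,     # Must play 25+ matches to reach Master
--         "Grandmaster": 30 # Must play 30+ matches to reach Grandmaster
--     }
--
--     # Find the highest tier the player can access based on matches played
--     max_tier_by_matches = "Bronze"
--     for tier_name, _, _, _, _ in TIER_DEFINITIONS:
--         required_matches = TIER_MATCH_REQUIREMENTS.get(tier_name, 0)
--         if matches_played >= required_matches:
--             max_tier_by_matches = tier_name
--         else:
--             break  # Tiers are in ascending order
--
--     # Return the lower of the two constraints (CR tier vs match requirement tier)
--     tier_order = [tier[0] for tier in TIER_DEFINITIONS]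
--
--     cr_tier_index = tier_order.index(cr_tier) if cr_tier in tier_order else 0
--     match_tier_index = tier_order.index(max_tier_by_matches) if max_tier_by_matches in tier_order else 0
--
--     # Use the lower tier (more restrictive)
--     final_tier_index = min(cr_tier_index, match_tier_index)
--     return tier_order[final_tier_index]
-- ===== SOURCE B (Python) =====
-- TIER_DEFINITIONS = [
--     ("Bronze",      1,   20,  900, 1200),
--     ("Silver",     20,   40, 1200, 1500),
--     ("Gold",       40,   60, 1500, 1800),
--     ("Platinum",   60,   80, 1800, 2100),
--     ("Diamond",    80,   95, 2100, 2500),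
--     ("Master",     95,   99, 2500, 3000),
--     ("Grandmaster", 99, 100, 3000, 5000),
-- ]
--
-- # Minimum matches required to hold each tier, aligned with TIER_DEFINITIONS.
-- TIER_MATCH_MINIMUMS = [0, 5, 10, 15, 20, 25, 30]
--
-- def get_tier_with_match_requirements(champion_rating: int, matches_played: int) -> str:
--     # Single descending scan: the final tier is the highest one whose CR floor
--     # and match minimum are both met; if none qualify, the player is Bronze.
--     for (name, _, _, min_cr, _), required in reversed(list(zip(TIER_DEFINITIONS, TIER_MATCH_MINIMUMS))):
--         if champion_rating >= min_cr and matches_played >= required: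
--             return name
--     return TIER_DEFINITIONS[0][0]
-- ===== Notes on version B (the rewrite author's own statement) =====
-- stated objective: simpler
-- what changed: Replaced A's two separate loops (CR bucket scan + match-requirement ascent) plus dict lookups, .index calls and min-of-indices with one descending scan over tiers paired with their match minimums, returning the first tier whose CR floor and match minimum are both met.
import Mathlib
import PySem

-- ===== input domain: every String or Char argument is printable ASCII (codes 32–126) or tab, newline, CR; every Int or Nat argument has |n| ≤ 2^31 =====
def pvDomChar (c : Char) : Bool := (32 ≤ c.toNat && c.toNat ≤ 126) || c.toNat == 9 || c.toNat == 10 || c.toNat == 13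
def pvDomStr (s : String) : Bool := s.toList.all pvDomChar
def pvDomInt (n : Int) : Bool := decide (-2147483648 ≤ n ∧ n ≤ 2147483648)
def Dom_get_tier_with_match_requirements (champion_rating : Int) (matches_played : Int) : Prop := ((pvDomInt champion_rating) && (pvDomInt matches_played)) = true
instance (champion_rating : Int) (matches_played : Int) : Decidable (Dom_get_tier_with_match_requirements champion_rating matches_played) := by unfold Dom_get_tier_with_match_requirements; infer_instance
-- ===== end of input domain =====

-- B replaces A's two loops + dict/.index/min juggling with one descending scan; objective: simpler.

-- ===== PORT A =====
def pvTIER_DEFINITIONS : List (String × Int × Int × Int × Int) :=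
  [("Bronze",      1,   20,  900, 1200),
   ("Silver",     20,   40, 1200, 1500),
   ("Gold",       40,   60, 1500, 1800),
   ("Platinum",   60,   80, 1800, 2100),
   ("Diamond",    80,   95, 2100, 2500),
   ("Master",     95,   99, 2500, 3000),
   ("Grandmaster", 99, 100, 3000, 5000)]

-- the for-loop of get_tier_from_cr: first tier with min_cr <= cr < max_cr
def pvCrLoop (cr : Int) : List (String × Int × Int × Int × Int) → Option String
  | [] => none
  | (name, _, _, minc, maxc) :: rest =>
      if minc ≤ cr ∧ cr < maxc then some name else pvCrLoop cr rest

def get_tier_from_cr (champion_rating : Int) : String :=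
  match pvCrLoop champion_rating pvTIER_DEFINITIONS with
  | some t => t
  | none =>
      -- TIER_DEFINITIONS[0][3] = 900, TIER_DEFINITIONS[0][0] = "Bronze", TIER_DEFINITIONS[-1][0] = "Grandmaster"
      if champion_rating < 900 then "Bronze" else "Grandmaster"

def pvTIER_MATCH_REQUIREMENTS : PySem.Dict String Int :=
  PySem.Dict.ofList [("Bronze", 0), ("Silver", 5), ("Gold", 10), ("Platinum", 15),
   ("Diamond", 20), ("Master", 25), ("Grandmaster", 30)]

-- the for-loop over TIER_DEFINITIONS with break, accumulating max_tier_by_matches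
def pvMatchLoop (m : Int) (acc : String) : List (String × Int × Int × Int × Int) → String
  | [] => acc
  | (name, _, _, _, _) :: rest =>
      let required := PySem.Dict.getD pvTIER_MATCH_REQUIREMENTS name 0
      if required ≤ m then pvMatchLoop m name rest else acc

def get_tier_with_match_requirements (champion_rating : Int) (matches_played : Int) : String :=
  let cr_tier := get_tier_from_cr champion_rating
  let max_tier_by_matches := pvMatchLoop matches_played "Bronze" pvTIER_DEFINITIONS
  let tier_order := pvTIER_DEFINITIONS.map (fun t => t.1)
  let cr_tier_index : Nat :=
    if tier_order.contains cr_tier then (PySem.List.index? tier_order cr_tier).getD 0 else 0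
  let match_tier_index : Nat :=
    if tier_order.contains max_tier_by_matches then (PySem.List.index? tier_order max_tier_by_matches).getD 0 else 0
  let final_tier_index := min cr_tier_index match_tier_index
  (PySem.List.pyGet? tier_order (final_tier_index : Int)).getD ""

-- ===== PORT B =====
def pvTIER_MATCH_MINIMUMS : List Int := [0, 5, 10, 15, 20, 25, 30]

def pvAltScan (cr m : Int) : List ((String × Int × Int × Int × Int) × Int) → String
  | [] => "Bronze"  -- TIER_DEFINITIONS[0][0]
  | ((name, _, _, minc, _), required) :: rest =>
      if minc ≤ cr ∧ required ≤ m then name else pvAltScan cr m rest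

def get_tier_with_match_requirements_alt (champion_rating : Int) (matches_played : Int) : String :=
  pvAltScan champion_rating matches_played
    (pvTIER_DEFINITIONS.zip pvTIER_MATCH_MINIMUMS).reverse

-- ===== PRECONDITION & SPEC =====
def Spec_get_tier_with_match_requirements (champion_rating : Int) (matches_played : Int) (out : String) : Prop := out = get_tier_with_match_requirements_alt champion_rating matches_played
instance (champion_rating : Int) (matches_played : Int) (out : String) : Decidable (Spec_get_tier_with_match_requirements champion_rating matches_played out) := by unfold Spec_get_tier_with_match_requirements; infer_instance

-- ===== CLAIM (what is proved, stated in full; the proofs are below) =====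
def Claim_equal_get_tier_with_match_requirements : Prop := ∀ (champion_rating : Int) (matches_played : Int), Dom_get_tier_with_match_requirements champion_rating matches_played → Spec_get_tier_with_match_requirements champion_rating matches_played (get_tier_with_match_requirements champion_rating matches_played)

-- ===== LEMMAS AND PROOFS =====
def pvNames : List String := ["Bronze", "Silver", "Gold", "Platinum", "Diamond", "Master", "Grandmaster"]
def pvIdxC (cr : Int) : Nat := if cr < 1200 then 0 else if cr < 1500 then 1 else if cr < 1800 then 2
  else if cr < 2100 then 3 else if cr < 2500 then 4 else if cr < 3000 then 5 else 6
def pvIdxM (m : Int) : Nat := if m < 5 then 0 else if m < 10 then 1 else if m < 15 then 2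
  else if m < 20 then 3 else if m < 25 then 4 else if m < 30 then 5 else 6

theorem pv_cr_char' (cr : Int) : get_tier_from_cr cr = pvNames.getD (pvIdxC cr) "" := by
  unfold get_tier_from_cr pvIdxC pvNames
  simp only [pvTIER_DEFINITIONS, pvCrLoop]
  split_ifs <;> first | rfl | omega

set_option maxHeartbeats 1000000 in
theorem pv_match_char' (m : Int) : pvMatchLoop m "Bronze" pvTIER_DEFINITIONS = pvNames.getD (pvIdxM m) "" := by
  have hB : PySem.Dict.getD pvTIER_MATCH_REQUIREMENTS "Bronze" 0 = 0 := by decide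
  have hS : PySem.Dict.getD pvTIER_MATCH_REQUIREMENTS "Silver" 0 = 5 := by decide
  have hG : PySem.Dict.getD pvTIER_MATCH_REQUIREMENTS "Gold" 0 = 10 := by decide
  have hP : PySem.Dict.getD pvTIER_MATCH_REQUIREMENTS "Platinum" 0 = 15 := by decide
  have hD : PySem.Dict.getD pvTIER_MATCH_REQUIREMENTS "Diamond" 0 = 20 := by decide
  have hM : PySem.Dict.getD pvTIER_MATCH_REQUIREMENTS "Master" 0 = 25 := by decide
  have hGM : PySem.Dict.getD pvTIER_MATCH_REQUIREMENTS "Grandmaster" 0 = 30 := by decide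
  unfold pvIdxM pvNames
  simp only [pvTIER_DEFINITIONS]
  simp only [pvMatchLoop]
  rw [hB, hS, hG, hP, hD, hM, hGM]
  split_ifs <;> first | rfl | omega

set_option maxHeartbeats 1000000 in
theorem pv_tail (i j : Nat) (hi : i ≤ 6) (hj : j ≤ 6) :
    (let tier_order := pvTIER_DEFINITIONS.map (fun t => t.1)
     let cr_tier := pvNames.getD i ""
     let max_tier_by_matches := pvNames.getD j ""
     let cr_tier_index : Nat :=
       if tier_order.contains cr_tier then (PySem.List.index? tier_order cr_tier).getD 0 else 0
     let match_tier_index : Nat :=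
       if tier_order.contains max_tier_by_matches then (PySem.List.index? tier_order max_tier_by_matches).getD 0 else 0
     (PySem.List.pyGet? tier_order ((min cr_tier_index match_tier_index : Nat) : Int)).getD "")
    = pvNames.getD (min i j) "" := by
  interval_cases i <;> interval_cases j <;> decide

set_option maxHeartbeats 1000000 in
theorem pv_A_char (cr m : Int) : get_tier_with_match_requirements cr m = pvNames.getD (min (pvIdxC cr) (pvIdxM m)) "" := by
  unfold get_tier_with_match_requirements
  rw [pv_cr_char', pv_match_char']
  exact pv_tail (pvIdxC cr) (pvIdxM m) (by unfold pvIdxC; split_ifs <;> omega) (by unfold pvIdxM; split_ifs <;> omega)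
theorem pv_c1 (cr : Int) : ((1200:Int) ≤ cr) ↔ 1 ≤ pvIdxC cr := by unfold pvIdxC; split_ifs <;> omega
theorem pv_c2 (cr : Int) : ((1500:Int) ≤ cr) ↔ 2 ≤ pvIdxC cr := by unfold pvIdxC; split_ifs <;> omega
theorem pv_c3 (cr : Int) : ((1800:Int) ≤ cr) ↔ 3 ≤ pvIdxC cr := by unfold pvIdxC; split_ifs <;> omega
theorem pv_c4 (cr : Int) : ((2100:Int) ≤ cr) ↔ 4 ≤ pvIdxC cr := by unfold pvIdxC; split_ifs <;> omega
theorem pv_c5 (cr : Int) : ((2500:Int) ≤ cr) ↔ 5 ≤ pvIdxC cr := by unfold pvIdxC; split_ifs <;> omega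
theorem pv_c6 (cr : Int) : ((3000:Int) ≤ cr) ↔ 6 ≤ pvIdxC cr := by unfold pvIdxC; split_ifs <;> omega
theorem pv_m1 (m : Int) : ((5:Int) ≤ m) ↔ 1 ≤ pvIdxM m := by unfold pvIdxM; split_ifs <;> omega
theorem pv_m2 (m : Int) : ((10:Int) ≤ m) ↔ 2 ≤ pvIdxM m := by unfold pvIdxM; split_ifs <;> omega
theorem pv_m3 (m : Int) : ((15:Int) ≤ m) ↔ 3 ≤ pvIdxM m := by unfold pvIdxM; split_ifs <;> omega
theorem pv_m4 (m : Int) : ((20:Int) ≤ m) ↔ 4 ≤ pvIdxM m := by unfold pvIdxM; split_ifs <;> omega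
theorem pv_m5 (m : Int) : ((25:Int) ≤ m) ↔ 5 ≤ pvIdxM m := by unfold pvIdxM; split_ifs <;> omega
theorem pv_m6 (m : Int) : ((30:Int) ≤ m) ↔ 6 ≤ pvIdxM m := by unfold pvIdxM; split_ifs <;> omega

set_option maxHeartbeats 1000000 in
theorem pv_B_char (cr m : Int) : get_tier_with_match_requirements_alt cr m = pvNames.getD (min (pvIdxC cr) (pvIdxM m)) "" := by
  unfold get_tier_with_match_requirements_alt
  simp only [pvTIER_DEFINITIONS, pvTIER_MATCH_MINIMUMS, List.zip, List.zipWith,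
    List.reverse, List.reverseAux, pvAltScan]
  have hic : pvIdxC cr ≤ 6 := by unfold pvIdxC; split_ifs <;> omega
  have him : pvIdxM m ≤ 6 := by unfold pvIdxM; split_ifs <;> omega
  simp only [pv_c1 cr, pv_c2 cr, pv_c3 cr, pv_c4 cr, pv_c5 cr, pv_c6 cr,
             pv_m1 m, pv_m2 m, pv_m3 m, pv_m4 m, pv_m5 m, pv_m6 m]
  generalize hI : pvIdxC cr = i at hic ⊢
  generalize hJ : pvIdxM m = j at him ⊢
  by_cases h0 : ((900:Int) ≤ cr ∧ (0:Int) ≤ m)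
  · rw [if_pos h0]; interval_cases i <;> interval_cases j <;> decide
  · rw [if_neg h0]; interval_cases i <;> interval_cases j <;> decide

-- ===== VERDICT (by name: the statement is the Claim_ definition above) =====
theorem get_tier_with_match_requirements_spec : Claim_equal_get_tier_with_match_requirements := by
  intro cr m _
  unfold Spec_get_tier_with_match_requirements
  rw [pv_A_char, pv_B_char]
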